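-- pv_equiv track=rewrite | github.com/galvaoribeiro/mailgun | mailgun_client.py | convert_template_tags
-- ===== SOURCE A (Python) =====
-- def convert_template_tags(template: str) -> str:
--     """Converte tags do formato {name} para o formato %recipient.name% do Mailgun"""
--     replacements = {
--         '{name}': '%recipient.name%',
--         '{company}': '%recipient.company%',
--         '{position}': '%recipient.position%',
--         '{source}': '%recipient.source%'
--     }
--
--     converted_template = template
--     for old_tag, new_tag in replacements.items():
--         converted_template = converted_template.replace(old_tag, new_tag)
--
--     return converted_template
-- ===== SOURCE B (Python) =====
-- _TAGS = [
--     ('{name}', '%recipient.name%'),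
--     ('{company}', '%recipient.company%'),
--     ('{position}', '%recipient.position%'),
--     ('{source}', '%recipient.source%'),
-- ]
--
--
-- def convert_template_tags(template: str) -> str:
--     """Converte tags do formato {name} para o formato %recipient.name% do Mailgun"""
--     out = []
--     i = 0
--     n = len(template)
--     while i < n:
--         for tag, repl in _TAGS:
--             if template.startswith(tag, i):
--                 out.append(repl)
--                 i += len(tag)
--                 break
--         else:
--             out.append(template[i])
--             i += 1
--     return ''.join(out)
-- ===== Notes on version B (the rewrite author's own statement) =====
-- stated objective: alternative
-- what changed: A makes four sequential full-string str.replace passes (one per tag); B makes a single left-to-right scan that at each position tries the four tags in order, emits the replacement and jumps past the tag, otherwise copies one character.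
import Mathlib
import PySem

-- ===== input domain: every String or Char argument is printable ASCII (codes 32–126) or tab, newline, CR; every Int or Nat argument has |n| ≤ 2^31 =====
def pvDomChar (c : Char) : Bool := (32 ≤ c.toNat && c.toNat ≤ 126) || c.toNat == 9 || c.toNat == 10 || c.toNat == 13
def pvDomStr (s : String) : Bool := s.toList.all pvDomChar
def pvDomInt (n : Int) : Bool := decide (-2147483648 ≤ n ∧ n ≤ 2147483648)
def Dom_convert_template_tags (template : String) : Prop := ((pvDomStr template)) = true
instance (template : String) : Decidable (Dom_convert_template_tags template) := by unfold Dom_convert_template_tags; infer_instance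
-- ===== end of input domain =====

-- B replaces A's four sequential full-string str.replace passes by a single left-to-right scan
-- that tries the four tags at each position (alternative decomposition, same result).

-- ===== PORT A =====
def convert_template_tags (template : String) : String :=
  let replacements : List (String × String) :=
    [("{name}", "%recipient.name%"),
     ("{company}", "%recipient.company%"),
     ("{position}", "%recipient.position%"),
     ("{source}", "%recipient.source%")]
  replacements.foldl (fun converted p => PySem.Str.replace converted p.1 p.2) template

-- ===== PORT B =====
def pvTags : List (List Char × List Char) :=
  [("{name}".toList, "%recipient.name%".toList),
   ("{company}".toList, "%recipient.company%".toList),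
   ("{position}".toList, "%recipient.position%".toList),
   ("{source}".toList, "%recipient.source%".toList)]

-- Source B's while loop: at each position try the tags in order (startswith); on a match emit the
-- replacement and advance by the tag's length (drop (tag.length - 1) of the tail), else copy one char.
def pvScan (ps : List (List Char × List Char)) : List Char → List Char
  | [] => []
  | c :: t =>
    match ps.find? (fun p => p.1.isPrefixOf (c :: t)) with
    | some (tag, r) => r ++ pvScan ps (List.drop (tag.length - 1) t)
    | none => c :: pvScan ps t
termination_by s => s.length
decreasing_by
  all_goals simp [List.length_drop]

def convert_template_tags_alt (template : String) : String :=
  String.ofList (pvScan pvTags template.toList)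

-- ===== PRECONDITION & SPEC =====
def Spec_convert_template_tags (template : String) (out : String) : Prop := out = convert_template_tags_alt template
instance (template : String) (out : String) : Decidable (Spec_convert_template_tags template out) := by unfold Spec_convert_template_tags; infer_instance

-- ===== CLAIM (what is proved, stated in full; the proofs are below) =====
def Claim_equal_convert_template_tags : Prop := ∀ (template : String), Dom_convert_template_tags template → Spec_convert_template_tags template (convert_template_tags template)

-- ===== LEMMAS AND PROOFS =====

-- structural model of PySem.Chars.replace for a nonempty pattern
def repM (old new : List Char) : List Char → List Char
  | [] => []
  | c :: t =>
    if old.isPrefixOf (c :: t) then new ++ repM old new (List.drop (old.length - 1) t)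
    else c :: repM old new t
termination_by s => s.length
decreasing_by
  all_goals simp [List.length_drop]

-- shape of a tag/replacement pair: tag = '{' :: tl with no '{','%' in tl; replacement starts with '%' and has no '{'
def tagOK (p : List Char × List Char) : Bool :=
  (p.1.headD ' ' == '{') && !p.1.tail.contains '{' && !p.1.tail.contains '%' && (p.1 != [])
  && (p.2.headD ' ' == '%') && (p.2 != []) && !p.2.contains '{'

lemma tagOK_tag {t r : List Char} (h : tagOK (t, r) = true) :
    ∃ tl, t = '{' :: tl ∧ '{' ∉ tl ∧ '%' ∉ tl := by
  cases t with
  | nil => simp [tagOK] at h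
  | cons c tl =>
    simp [tagOK] at h
    obtain ⟨⟨⟨⟨⟨h1, h2⟩, h3⟩, -⟩, -⟩, -⟩ := h
    exact ⟨tl, by simp_all, by simp_all, by simp_all⟩

lemma tagOK_repl {t r : List Char} (h : tagOK (t, r) = true) :
    (∃ r', r = '%' :: r') ∧ '{' ∉ r := by
  cases r with
  | nil => simp [tagOK] at h
  | cons c r' =>
    simp [tagOK] at h
    obtain ⟨⟨-, h5⟩, h6, h7⟩ := h
    exact ⟨⟨r', by simp_all⟩, by simp_all⟩

lemma go_eq_repM (old new : List Char) (h : old ≠ []) :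
    ∀ fuel l acc, l.length ≤ fuel →
      PySem.Chars.replace.go old new fuel l acc = acc.reverse ++ repM old new l := by
  intro fuel
  induction fuel with
  | zero =>
    intro l acc hl
    have : l = [] := List.eq_nil_of_length_eq_zero (Nat.le_zero.mp hl)
    subst this
    rw [PySem.Chars.replace.go]
    simp [repM]
  | succ n ih =>
    intro l acc hl
    cases l with
    | nil =>
      rw [PySem.Chars.replace.go]
      simp [repM]
      omega
    | cons c t =>
      obtain ⟨o, otl, rfl⟩ : ∃ o otl, old = o :: otl := by
        cases old with | nil => exact absurd rfl h | cons o otl => exact ⟨o, otl, rfl⟩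
      rw [PySem.Chars.replace.go]
      by_cases hp : (o :: otl).isPrefixOf (c :: t) = true
      · rw [if_pos hp]
        have hl' : t.length + 1 ≤ n + 1 := by simpa using hl
        have hlen : (List.drop (o :: otl).length (c :: t)).length ≤ n := by
          simp [List.length_drop]
          omega
        rw [ih _ _ hlen]
        have hdrop : List.drop (o :: otl).length (c :: t) = List.drop ((o :: otl).length - 1) t := by
          simp [List.drop_succ_cons]
        rw [repM, if_pos hp, ← hdrop]
        simp
      · rw [if_neg hp]
        have hlen : t.length ≤ n := by simpa using hl
        rw [ih _ _ hlen]
        rw [repM, if_neg hp]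
        simp

lemma replace_eq_repM (s old new : List Char) (h : old ≠ []) :
    PySem.Chars.replace s old new = repM old new s := by
  unfold PySem.Chars.replace
  rw [if_neg (by simp [h])]
  simpa using go_eq_repM old new h s.length s [] le_rfl

lemma scan_nil_ps : ∀ s : List Char, pvScan [] s = s := by
  intro s
  induction s with
  | nil => rw [pvScan]
  | cons c t ih => rw [pvScan]; simpa using ih

lemma scan_nil (ps : List (List Char × List Char)) : pvScan ps [] = [] := by
  rw [pvScan]

-- a '{'-free block passes through the scanner unchanged
lemma scan_append_of_no_brace (ps : List (List Char × List Char))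
    (hps : ∀ p ∈ ps, tagOK p = true) :
    ∀ p x : List Char, '{' ∉ p → pvScan ps (p ++ x) = p ++ pvScan ps x := by
  intro p
  induction p with
  | nil => intro x _; simp
  | cons c q ih =>
    intro x hp
    have hc : c ≠ '{' := by intro h; exact hp (h ▸ List.mem_cons_self ..)
    have hfind : ps.find? (fun pr => pr.1.isPrefixOf (c :: (q ++ x))) = none := by
      rw [List.find?_eq_none]
      intro pr hpr
      obtain ⟨tl, htl, -, -⟩ := tagOK_tag (t := pr.1) (r := pr.2) (hps pr hpr)
      simp only [htl, List.isPrefixOf_iff_prefix, List.cons_prefix_cons]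
      intro hcon
      exact hc hcon.1.symm
    rw [List.cons_append, pvScan, hfind]
    have := ih x (fun h => hp (List.mem_cons_of_mem _ h))
    simp [this]

-- a '{'-free block passes through repM with a '{'-headed pattern unchanged
lemma repM_append_of_no_brace (tl new : List Char) :
    ∀ p x : List Char, '{' ∉ p → repM ('{' :: tl) new (p ++ x) = p ++ repM ('{' :: tl) new x := by
  intro p
  induction p with
  | nil => intro x _; simp
  | cons c q ih =>
    intro x hp
    have hc : c ≠ '{' := by intro h; exact hp (h ▸ List.mem_cons_self ..)
    have hpre : ¬ ('{' :: tl).isPrefixOf (c :: (q ++ x)) = true := by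
      simp only [List.isPrefixOf_iff_prefix, List.cons_prefix_cons]
      intro hcon
      exact hc hcon.1.symm
    rw [List.cons_append, repM, if_neg hpre]
    have := ih x (fun h => hp (List.mem_cons_of_mem _ h))
    simp [this]

-- a '{'- and '%'-free prefix of the scanner's output is a prefix of the input
lemma prefix_of_scan (ps : List (List Char × List Char))
    (hps : ∀ p ∈ ps, tagOK p = true) :
    ∀ n s p : List Char, s.length ≤ n.length → '{' ∉ p → '%' ∉ p →
      p <+: pvScan ps s → p <+: s := by
  intro n
  induction n with
  | nil =>
    intro s p hl _ _ hpre
    have : s = [] := List.eq_nil_of_length_eq_zero (Nat.le_zero.mp hl)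
    subst this
    rwa [scan_nil] at hpre
  | cons _ m ih =>
    intro s p hl hbr hpc hpre
    cases s with
    | nil => rwa [scan_nil] at hpre
    | cons c t =>
      rw [pvScan] at hpre
      cases hf : ps.find? (fun pr => pr.1.isPrefixOf (c :: t)) with
      | some pr =>
        rw [hf] at hpre
        obtain ⟨tag, r⟩ := pr
        obtain ⟨⟨r', hr'⟩, -⟩ := tagOK_repl (t := tag) (r := r) (hps _ (List.mem_of_find?_eq_some hf))
        cases p with
        | nil => exact List.nil_prefix
        | cons d p' =>
          exfalso
          rw [hr'] at hpre
          have : d = '%' := (List.cons_prefix_cons.mp hpre).1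
          exact hpc (this ▸ List.mem_cons_self ..)
      | none =>
        rw [hf] at hpre
        cases p with
        | nil => exact List.nil_prefix
        | cons d p' =>
          obtain ⟨hd, hp'⟩ := List.cons_prefix_cons.mp hpre
          have ht : p' <+: t := by
            refine ih t p' (by simpa using hl) ?_ ?_ hp'
            · exact fun h => hbr (List.mem_cons_of_mem _ h)
            · exact fun h => hpc (List.mem_cons_of_mem _ h)
          exact List.cons_prefix_cons.mpr ⟨hd, ht⟩

-- the scanner does not create a new occurrence of a tag at the current position
lemma not_prefix_scan (ps : List (List Char × List Char))
    (hps : ∀ p ∈ ps, tagOK p = true) (tl : List Char)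
    (h1 : '{' ∉ tl) (h2 : '%' ∉ tl) (c : Char) (t : List Char)
    (h : ¬ ('{' :: tl) <+: (c :: t)) : ¬ ('{' :: tl) <+: (c :: pvScan ps t) := by
  intro hcon
  obtain ⟨hc, htl⟩ := List.cons_prefix_cons.mp hcon
  exact h (List.cons_prefix_cons.mpr ⟨hc, prefix_of_scan ps hps t t tl le_rfl h1 h2 htl⟩)

-- one stage: applying repM for a fresh tag after scanning with ps equals scanning with ps ++ [tag]
lemma stage (tag r : List Char) (ps : List (List Char × List Char))
    (htag : tagOK (tag, r) = true) (hps : ∀ p ∈ ps, tagOK p = true)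
    (hnp : ∀ p ∈ ps, ∀ x : List Char, ¬ p.1 <+: (tag ++ x)) :
    ∀ n s : List Char, s.length ≤ n.length →
      repM tag r (pvScan ps s) = pvScan (ps ++ [(tag, r)]) s := by
  obtain ⟨tl, htl, hbr, hpc⟩ := tagOK_tag htag
  subst htl
  intro n
  induction n with
  | nil =>
    intro s hl
    have : s = [] := List.eq_nil_of_length_eq_zero (Nat.le_zero.mp hl)
    subst this
    simp [pvScan, repM]
  | cons _ m ih =>
    intro s hl
    cases s with
    | nil => simp [pvScan, repM]
    | cons c t =>
      cases hf : ps.find? (fun pr => pr.1.isPrefixOf (c :: t)) with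
      | some pr =>
        obtain ⟨t₁, r₁⟩ := pr
        have hmem := List.mem_of_find?_eq_some hf
        obtain ⟨-, hnb⟩ := tagOK_repl (t := t₁) (r := r₁) (hps _ hmem)
        have hL : pvScan ps (c :: t) = r₁ ++ pvScan ps (List.drop (t₁.length - 1) t) := by
          rw [pvScan, hf]
        have hR : pvScan (ps ++ [('{' :: tl, r)]) (c :: t)
            = r₁ ++ pvScan (ps ++ [('{' :: tl, r)]) (List.drop (t₁.length - 1) t) := by
          rw [pvScan, List.find?_append, hf]; rfl
        rw [hL, hR, repM_append_of_no_brace tl r _ _ hnb]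
        congr 1
        refine ih _ ?_
        have hl' : t.length + 1 ≤ m.length + 1 := by simpa using hl
        simp [List.length_drop]
        omega
      | none =>
        by_cases hpre : ('{' :: tl) <+: (c :: t)
        · obtain ⟨x, hx⟩ := hpre
          have hc : c = '{' := by
            have := congrArg (fun l => l.headD ' ') hx
            simpa using this.symm
          have ht : t = tl ++ x := by
            have := congrArg List.tail hx
            simpa using this.symm
          subst hc; subst ht
          have hL : pvScan ps ('{' :: (tl ++ x)) = '{' :: (tl ++ pvScan ps x) := by
            rw [pvScan, hf, scan_append_of_no_brace ps hps tl x hbr]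
          have hdrop : List.drop (('{' :: tl).length - 1) (tl ++ pvScan ps x) = pvScan ps x := by
            simp
          have hdrop' : List.drop (('{' :: tl).length - 1) (tl ++ x) = x := by
            simp
          have hR : pvScan (ps ++ [('{' :: tl, r)]) ('{' :: (tl ++ x))
              = r ++ pvScan (ps ++ [('{' :: tl, r)]) x := by
            rw [pvScan, List.find?_append, hf]
            have : ('{' :: tl).isPrefixOf ('{' :: (tl ++ x)) = true := by
              rw [List.isPrefixOf_iff_prefix]
              exact ⟨x, by simp⟩
            simp only [Option.or, List.find?_cons, this, hdrop']
          have hP : ('{' :: tl).isPrefixOf ('{' :: (tl ++ pvScan ps x)) = true := by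
            rw [List.isPrefixOf_iff_prefix]
            exact ⟨pvScan ps x, by simp⟩
          rw [hL, repM, if_pos hP, hdrop, hR,
            ih _ (by simpa using Nat.le_of_succ_le_succ (le_trans (by simp) hl))]
        · have hL : pvScan ps (c :: t) = c :: pvScan ps t := by rw [pvScan, hf]
          have hnp' : ¬ ('{' :: tl).isPrefixOf (c :: pvScan ps t) = true := by
            rw [List.isPrefixOf_iff_prefix]
            exact not_prefix_scan ps hps tl hbr hpc c t hpre
          have hR : pvScan (ps ++ [('{' :: tl, r)]) (c :: t)
              = c :: pvScan (ps ++ [('{' :: tl, r)]) t := by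
            rw [pvScan, List.find?_append, hf]
            have : ('{' :: tl).isPrefixOf (c :: t) = false := by
              rw [Bool.eq_false_iff]
              simpa [List.isPrefixOf_iff_prefix] using hpre
            simp only [Option.or, List.find?_cons, this, List.find?_nil]
          rw [hL, repM, if_neg hnp', hR, ih _ (by simpa using hl)]

lemma not_prefix_append {a b : List Char} (h : ¬ (a.take b.length) <+: b)
    (x : List Char) : ¬ a <+: (b ++ x) := by
  intro hc
  apply h
  have h1 := hc.take b.length
  rwa [List.take_left] at h1

-- ===== VERDICT (by name: the statement is the Claim_ definition above) =====
theorem convert_template_tags_spec : Claim_equal_convert_template_tags := by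
  intro template _
  unfold Spec_convert_template_tags convert_template_tags convert_template_tags_alt
  refine String.toList_inj.mp ?_
  simp only [List.foldl, PySem.Str.toList_replace, String.toList_ofList]
  rw [replace_eq_repM _ _ _ (by decide), replace_eq_repM _ _ _ (by decide),
    replace_eq_repM _ _ _ (by decide), replace_eq_repM _ _ _ (by decide)]
  generalize template.toList = l
  have hnp2 : ∀ p ∈ [("{name}".toList, "%recipient.name%".toList)],
      ∀ x : List Char, ¬ p.1 <+: ("{company}".toList ++ x) := by
    intro p hp x
    simp only [List.mem_singleton] at hp
    subst hp
    exact not_prefix_append (by decide) x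
  have hnp3 : ∀ p ∈ [("{name}".toList, "%recipient.name%".toList),
      ("{company}".toList, "%recipient.company%".toList)],
      ∀ x : List Char, ¬ p.1 <+: ("{position}".toList ++ x) := by
    intro p hp x
    simp only [List.mem_cons, List.not_mem_nil, or_false] at hp
    rcases hp with rfl | rfl
    · exact not_prefix_append (by decide) x
    · exact not_prefix_append (by decide) x
  have hnp4 : ∀ p ∈ [("{name}".toList, "%recipient.name%".toList),
      ("{company}".toList, "%recipient.company%".toList),
      ("{position}".toList, "%recipient.position%".toList)],
      ∀ x : List Char, ¬ p.1 <+: ("{source}".toList ++ x) := by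
    intro p hp x
    simp only [List.mem_cons, List.not_mem_nil, or_false] at hp
    rcases hp with rfl | rfl | rfl
    · exact not_prefix_append (by decide) x
    · exact not_prefix_append (by decide) x
    · exact not_prefix_append (by decide) x
  have e1 : repM "{name}".toList "%recipient.name%".toList l
      = pvScan [("{name}".toList, "%recipient.name%".toList)] l := by
    have := stage "{name}".toList "%recipient.name%".toList [] (by decide) (by simp)
      (by simp) l l le_rfl
    rwa [scan_nil_ps] at this
  rw [e1, stage _ _ _ (by decide) (by decide) hnp2 l l le_rfl]
  simp only [List.cons_append, List.nil_append]
  rw [stage _ _ _ (by decide) (by decide) hnp3 l l le_rfl]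
  simp only [List.cons_append, List.nil_append]
  rw [stage _ _ _ (by decide) (by decide) hnp4 l l le_rfl]
  simp [pvTags]
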